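-- pv_equiv track=rewrite | github.com/ISEglock17/ShogiGame | test.py | board_to_sfen
-- ===== SOURCE A (Python) =====
-- def board_to_sfen(board, turn="b", hand_pieces=None, move_count=1):
--     """ 盤面の駒配置をSFEN表記に変換 """
--     sfen_board = []
--     for row in board:
--         empty_count = 0
--         row_sfen = ""
--         for cell in row:
--             if cell.strip() == ".":
--                 empty_count += 1
--             else:
--                 if empty_count > 0:
--                     row_sfen += str(empty_count)
--                     empty_count = 0
--                 # 駒をSFEN用に変換
--                 piece = cell.strip()  # 前後のスペースを取り除く
--                 if piece.isupper():  # Player側の駒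
--                     row_sfen += piece[0]
--                 else:  # Opponent側の駒は小文字
--                     row_sfen += piece[0].lower()
--         if empty_count > 0:
--             row_sfen += str(empty_count)
--         sfen_board.append(row_sfen)
--
--     # 盤面行ごとに '/' で区切る
--     sfen_board_str = "/".join(sfen_board)
--
--     # 2. 持ち駒を表現
--     if not hand_pieces:
--         hand_pieces_str = "-"
--     else:
--         hand_pieces_str = ""
--         for piece, count in hand_pieces.items():
--             hand_piece = piece[0].upper() if count > 0 else piece[0].lower()
--             hand_pieces_str += f"{hand_piece}{count}" if count > 1 else hand_piece
--
--     # 3. 最終SFEN文字列を構築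
--     sfen_str = f"{sfen_board_str} {turn} {hand_pieces_str} {move_count}"
--     return sfen_str
-- ===== SOURCE B (Python) =====
-- def _runs(s):
--     """Run-length encode s into [(char, length), ...]."""
--     if not s:
--         return []
--     n = 1
--     while n < len(s) and s[n] == s[0]:
--         n += 1
--     return [(s[0], n)] + _runs(s[n:])
--
--
-- def _cell_char(cell):
--     p = cell.strip()
--     if p == ".":
--         return "."
--     return p[0] if p.isupper() else p[0].lower()
--
--
-- def board_to_sfen(board, turn="b", hand_pieces=None, move_count=1):
--     """Board to SFEN: map cells to single chars, then run-length collapse the '.' runs."""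
--     rows = []
--     for row in board:
--         raw = "".join(_cell_char(cell) for cell in row)
--         rows.append("".join(str(n) if ch == "." else ch * n for ch, n in _runs(raw)))
--     board_str = "/".join(rows)
--     if not hand_pieces:
--         hand_str = "-"
--     else:
--         hand_str = "".join(
--             (p[0].upper() if c > 0 else p[0].lower()) + (str(c) if c > 1 else "")
--             for p, c in hand_pieces.items())
--     return f"{board_str} {turn} {hand_str} {move_count}"
-- ===== Notes on version B (the rewrite author's own statement) =====
-- stated objective: alternative
-- what changed: A builds each SFEN row in one pass with an empty-square counter flushed before each piece; B first maps every cell to a single character and then run-length-collapses the raw row string ('.'-runs become their length), with the hand string built by a join over per-entry strings instead of an accumulating loop.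
-- outside the precondition, e.g. on board_to_sfen([['.x', 'P']], 'b', None, 1): A returns '.P b - 1', B returns '1P b - 1'
import Mathlib
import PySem

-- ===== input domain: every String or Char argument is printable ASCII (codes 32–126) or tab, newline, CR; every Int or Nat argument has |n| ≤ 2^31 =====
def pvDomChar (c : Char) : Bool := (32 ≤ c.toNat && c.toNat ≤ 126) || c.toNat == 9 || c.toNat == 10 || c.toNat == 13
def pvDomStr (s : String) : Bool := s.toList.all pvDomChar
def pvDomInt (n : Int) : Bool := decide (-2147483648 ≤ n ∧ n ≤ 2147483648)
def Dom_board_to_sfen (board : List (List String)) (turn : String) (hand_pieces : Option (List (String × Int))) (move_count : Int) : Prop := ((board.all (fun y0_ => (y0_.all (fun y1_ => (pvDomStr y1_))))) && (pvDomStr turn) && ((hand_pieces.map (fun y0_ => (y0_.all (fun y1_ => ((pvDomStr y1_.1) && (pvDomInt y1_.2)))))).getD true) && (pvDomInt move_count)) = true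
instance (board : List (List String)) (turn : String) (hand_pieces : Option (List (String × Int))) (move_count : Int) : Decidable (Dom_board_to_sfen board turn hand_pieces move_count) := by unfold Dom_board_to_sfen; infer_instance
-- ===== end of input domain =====

-- B replaces A's one-pass counter-and-flush row loop by a per-cell character map followed by a
-- run-length collapse of the raw row string; same output, objective: alternative decomposition.

-- ===== PORT A =====
-- Python str.isupper() (exact on the ASCII domain: cased chars are the letters, so "some cased
-- char and no lowercase cased char" = "some uppercase letter and no lowercase letter")
def pyStrIsupperA (cs : List Char) : Bool :=
  cs.any PySem.Chars.isupper && cs.all (fun c => !PySem.Chars.islower c)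
-- piece = cell.strip(); row_sfen += piece[0] if piece.isupper() else piece[0].lower()
-- (piece[0] on the empty piece raises in Python; Pre_ excludes that, headD ' ' is a dummy there)
def pieceCharA (p : List Char) : Char :=
  if pyStrIsupperA p then p.headD ' ' else PySem.Chars.lowerChar (p.headD ' ')

-- the body of A's inner row loop: state (empty_count, row_sfen)
def rowStepA (st : Nat × List Char) (cell : String) : Nat × List Char :=
  let p := PySem.Chars.strip cell.toList
  if p = ['.'] then (st.1 + 1, st.2)
  else
    let acc := if st.1 > 0 then st.2 ++ PySem.Int.toChars (st.1 : Int) else st.2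
    (0, acc ++ [pieceCharA p])

-- A's inner row loop, with the final flush of empty_count
def rowA (row : List String) : List Char :=
  let st := row.foldl rowStepA (0, [])
  if st.1 > 0 then st.2 ++ PySem.Int.toChars (st.1 : Int) else st.2

-- the body of A's hand-piece loop: piece-letter (+ count if count > 1)
def handEntryA (pc : String × Int) : List Char :=
  let h := if pc.2 > 0 then PySem.Chars.upperChar (pc.1.toList.headD ' ')
           else PySem.Chars.lowerChar (pc.1.toList.headD ' ')
  if pc.2 > 1 then h :: PySem.Int.toChars pc.2 else [h]

def handA (hand : List (String × Int)) : List Char :=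
  hand.foldl (fun acc pc => acc ++ handEntryA pc) []

def board_to_sfen (board : List (List String)) (turn : String) (hand_pieces : Option (List (String × Int))) (move_count : Int) : String :=
  let sfen_board := board.foldl (fun acc row => acc ++ [rowA row]) []
  let sfen_board_str := PySem.Chars.join ['/'] sfen_board
  let hand_pieces_str : List Char :=
    match hand_pieces with
    | none => ['-']          -- "if not hand_pieces": None
    | some [] => ['-']       -- "if not hand_pieces": empty dict
    | some l => handA l
  String.ofList (sfen_board_str ++ ' ' :: turn.toList ++ ' ' :: hand_pieces_str ++ ' ' :: PySem.Int.toChars move_count)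

-- ===== PORT B =====
-- Python str.isupper(), B's own copy (same ASCII reading as pyStrIsupperA)
def pyStrIsupperB (cs : List Char) : Bool :=
  cs.any PySem.Chars.isupper && cs.all (fun c => !PySem.Chars.islower c)
-- _runs(s): run-length encoding; the Python while loop counts the equal prefix (= takeWhile length)
def runsB : List Char → List (Char × Nat)
  | [] => []
  | c :: cs =>
    let k := (cs.takeWhile (fun d => d == c)).length
    (c, k + 1) :: runsB (cs.drop k)
termination_by s => s.length
decreasing_by simp

-- _cell_char(cell)
def cellCharB (cell : String) : Char :=
  let p := PySem.Chars.strip cell.toList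
  if p = ['.'] then '.'
  else if pyStrIsupperB p then p.headD ' ' else PySem.Chars.lowerChar (p.headD ' ')

-- one board row: raw = "".join(_cell_char(cell) for cell in row); then collapse the runs
def rowB (row : List String) : List Char :=
  let raw := PySem.Chars.join [] (row.map (fun cell => [cellCharB cell]))
  PySem.Chars.join [] ((runsB raw).map (fun r =>
    if r.1 = '.' then PySem.Int.toChars (r.2 : Int) else List.replicate r.2 r.1))

-- hand string: "".join((p[0].upper() if c>0 else p[0].lower()) + (str(c) if c>1 else "") ...)
def handB (hand : List (String × Int)) : List Char :=
  PySem.Chars.join [] (hand.map (fun pc =>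
    (if pc.2 > 0 then [PySem.Chars.upperChar (pc.1.toList.headD ' ')]
     else [PySem.Chars.lowerChar (pc.1.toList.headD ' ')]) ++
    (if pc.2 > 1 then PySem.Int.toChars pc.2 else [])))

def board_to_sfen_alt (board : List (List String)) (turn : String) (hand_pieces : Option (List (String × Int))) (move_count : Int) : String :=
  let board_str := PySem.Chars.join ['/'] (board.map rowB)
  -- "if not hand_pieces": None and the empty dict both read as the empty item list
  let items := hand_pieces.getD []
  let hand_str : List Char := if items.isEmpty then ['-'] else handB items
  String.ofList (board_str ++ ' ' :: turn.toList ++ ' ' :: hand_str ++ ' ' :: PySem.Int.toChars move_count)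

-- ===== PRECONDITION & SPEC =====
-- Pre_ excludes (a) cells whose stripped text is empty and, when the hand dict is non-empty, empty
-- hand-piece names — there Python A raises IndexError on piece[0]; (b) cells whose stripped text
-- starts with '.' without being exactly "." — a malformed piece whose SFEN letter would be the '.'
-- empty-square marker, a corner no caller would specify (A emits the raw '.', B counts it as empty);
-- and (c) duplicate hand-piece names, on which the dict argument collapses entries before either
-- Python sees them, which the association-list model cannot follow.
def Pre_board_to_sfen (board : List (List String)) (turn : String) (hand_pieces : Option (List (String × Int))) (move_count : Int) : Prop :=
  (∀ row ∈ board, ∀ cell ∈ row,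
      PySem.Chars.strip cell.toList ≠ [] ∧
      (PySem.Chars.strip cell.toList = ['.'] ∨ (PySem.Chars.strip cell.toList).headD ' ' ≠ '.')) ∧
  (∀ l, hand_pieces = some l → (∀ pc ∈ l, pc.1.toList ≠ []) ∧ (l.map Prod.fst).Nodup)

instance (board : List (List String)) (turn : String) (hand_pieces : Option (List (String × Int))) (move_count : Int) : Decidable (Pre_board_to_sfen board turn hand_pieces move_count) := by unfold Pre_board_to_sfen; infer_instance

def pvWitness_board_to_sfen : List (List String) × String × (Option (List (String × Int))) × Int :=
  ([["P", ".", "k"]], "b", some [("P", 2), ("g", 0)], 7)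

def Spec_board_to_sfen (board : List (List String)) (turn : String) (hand_pieces : Option (List (String × Int))) (move_count : Int) (out : String) : Prop := out = board_to_sfen_alt board turn hand_pieces move_count
instance (board : List (List String)) (turn : String) (hand_pieces : Option (List (String × Int))) (move_count : Int) (out : String) : Decidable (Spec_board_to_sfen board turn hand_pieces move_count out) := by unfold Spec_board_to_sfen; infer_instance

-- ===== CLAIM (what is proved, stated in full; the proofs are below) =====
def Claim_equal_board_to_sfen : Prop := ∀ (board : List (List String)) (turn : String) (hand_pieces : Option (List (String × Int))) (move_count : Int), Dom_board_to_sfen board turn hand_pieces move_count → Pre_board_to_sfen board turn hand_pieces move_count → Spec_board_to_sfen board turn hand_pieces move_count (board_to_sfen board turn hand_pieces move_count)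

-- ===== LEMMAS AND PROOFS =====

-- "".join with empty separator is flatten
theorem join_nil_flatten (ls : List (List Char)) : PySem.Chars.join [] ls = ls.flatten := by
  induction ls with
  | nil => rfl
  | cons a t ih =>
    cases t with
    | nil => simp [PySem.Chars.join, List.intercalate]
    | cons b u => simp_all [PySem.Chars.join, List.intercalate, List.intersperse]

theorem toNat_ofNat_letter (n : Nat) (h1 : 97 ≤ n) (h2 : n ≤ 122) : (Char.ofNat n).toNat = n := by
  unfold Char.ofNat
  split
  · rfl
  · next hn => exact absurd (by constructor; omega : n.isValidChar) hn

theorem lowerChar_ne_dot (c : Char) (h : c ≠ '.') : PySem.Chars.lowerChar c ≠ '.' := by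
  unfold PySem.Chars.lowerChar PySem.Chars.isupper
  split
  · next hu =>
    simp only [Bool.and_eq_true, decide_eq_true_eq, Char.le_def, UInt32.le_iff_toNat_le] at hu
    have hA : 65 ≤ c.toNat := hu.1
    have hZ : c.toNat ≤ 90 := hu.2
    intro he
    have h46 : ('.' : Char).toNat = 46 := rfl
    have := congrArg Char.toNat he
    rw [toNat_ofNat_letter (c.toNat + 32) (by omega) (by omega), h46] at this
    omega
  · exact h

-- the piece character of a non-empty-square cell satisfying Pre_ is never '.'
theorem pieceCharA_ne_dot (p : List Char) (h : p.headD ' ' ≠ '.') : pieceCharA p ≠ '.' := by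
  unfold pieceCharA
  split
  · exact h
  · exact lowerChar_ne_dot _ h

-- reference collapse: what both row computations produce, char by char
def coll (ec : Nat) : List Char → List Char
  | [] => if ec > 0 then PySem.Int.toChars (ec : Int) else []
  | c :: cs =>
    if c = '.' then coll (ec + 1) cs
    else (if ec > 0 then PySem.Int.toChars (ec : Int) else []) ++ c :: coll 0 cs

theorem coll_no_dots (l : List Char) (t : List Char) (h : ∀ x ∈ l, x ≠ '.') :
    coll 0 (l ++ t) = l ++ coll 0 t := by
  induction l with
  | nil => rfl
  | cons a l ih =>
    have ha : a ≠ '.' := h a (by simp)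
    simp [coll, ha, ih (fun x hx => h x (by simp [hx]))]

theorem coll_dots (l : List Char) (t : List Char) (ec : Nat) (h : ∀ x ∈ l, x = '.') :
    coll ec (l ++ t) = coll (ec + l.length) t := by
  induction l generalizing ec with
  | nil => rfl
  | cons a l ih =>
    have ha : a = '.' := h a (by simp)
    subst ha
    show coll ec ('.' :: (l ++ t)) = _
    rw [show coll ec ('.' :: (l ++ t)) = coll (ec + 1) (l ++ t) from by simp [coll],
      ih (ec + 1) (fun x hx => h x (by simp [hx]))]
    congr 1
    simp
    omega

theorem coll_flush (t : List Char) (ec : Nat) (hec : 0 < ec) (ht : t.headD ' ' ≠ '.') :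
    coll ec t = PySem.Int.toChars (ec : Int) ++ coll 0 t := by
  cases t with
  | nil => simp [coll, hec]
  | cons d t => simp only [List.headD_cons] at ht; simp [coll, ht, hec]

theorem headD_dropWhile_dot_ne (cs : List Char) :
    ((cs.dropWhile (fun d => d == '.')).headD ' ') ≠ '.' := by
  cases hd : cs.dropWhile (fun d => d == '.') with
  | nil => simp
  | cons d t =>
    have := List.head?_dropWhile_not (fun d => d == '.') cs
    rw [hd] at this
    simpa using this

-- B's run-length collapse computes coll 0
theorem rowB_collapse (cs : List Char) :
    ((runsB cs).map (fun r =>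
      if r.1 = '.' then PySem.Int.toChars (r.2 : Int) else List.replicate r.2 r.1)).flatten
      = coll 0 cs := by
  fun_induction runsB cs with
  | case1 => rfl
  | case2 c cs k ih =>
    have hsplit : cs.takeWhile (fun d => d == c) ++ cs.dropWhile (fun d => d == c) = cs :=
      List.takeWhile_append_dropWhile
    have hdrop : cs.drop k = cs.dropWhile (fun d => d == c) := by
      conv_lhs => rw [← hsplit]
      exact List.drop_left
    have hpre : ∀ x ∈ cs.takeWhile (fun d => d == c), x = c := by
      intro x hx
      simpa using List.mem_takeWhile_imp hx
    have hlen : (cs.takeWhile (fun d => d == c)).length = k := rfl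
    rw [hdrop] at ih
    simp only [List.map_cons, List.flatten_cons, hdrop, ih]
    by_cases hc : c = '.'
    · subst hc
      have h1 : coll 0 ('.' :: cs) = coll 1 cs := by simp [coll]
      rw [h1, ← hsplit,
        coll_dots _ _ 1 (fun x hx => (hpre x hx)), hlen,
        coll_flush _ _ (by omega) (headD_dropWhile_dot_ne cs), Nat.add_comm 1 k]
      simp
    · have hrep : cs.takeWhile (fun d => d == c) = List.replicate k c := by
        rw [← hlen]
        exact List.eq_replicate_of_mem hpre
      have hne : ∀ x ∈ c :: cs.takeWhile (fun d => d == c), x ≠ '.' := by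
        intro x hx
        rcases List.mem_cons.1 hx with h | h
        · simpa [h] using hc
        · rw [hpre x h]; exact hc
      conv_rhs => rw [← hsplit]
      rw [show (c :: (cs.takeWhile (fun d => d == c) ++ cs.dropWhile (fun d => d == c)))
            = (c :: cs.takeWhile (fun d => d == c)) ++ cs.dropWhile (fun d => d == c) from rfl,
        coll_no_dots _ _ hne]
      simp [hc, hrep, List.replicate_succ]

-- A's row loop computes coll, from any pending state
theorem rowA_loop (row : List String) (ec : Nat) (acc : List Char)
    (h : ∀ cell ∈ row,
      PySem.Chars.strip cell.toList = ['.'] ∨ (PySem.Chars.strip cell.toList).headD ' ' ≠ '.') :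
    (let st := row.foldl rowStepA (ec, acc)
     if st.1 > 0 then st.2 ++ PySem.Int.toChars (st.1 : Int) else st.2)
      = acc ++ coll ec (row.map cellCharB) := by
  induction row generalizing ec acc with
  | nil =>
    show (if ec > 0 then acc ++ PySem.Int.toChars (ec : Int) else acc) = acc ++ coll ec []
    by_cases hec : ec > 0 <;> simp [coll, hec]
  | cons cell row ih =>
    have hcell := h cell (by simp)
    have hrest : ∀ c ∈ row, _ := fun c hc => h c (by simp [hc])
    by_cases hp : PySem.Chars.strip cell.toList = ['.']
    · have hchar : cellCharB cell = '.' := by simp [cellCharB, hp]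
      simp only [List.foldl_cons]
      rw [show rowStepA (ec, acc) cell = (ec + 1, acc) from by simp [rowStepA, hp]]
      rw [ih (ec + 1) acc hrest]
      simp [hchar, coll]
    · have hne : (PySem.Chars.strip cell.toList).headD ' ' ≠ '.' := hcell.resolve_left hp
      have hchar : cellCharB cell = pieceCharA (PySem.Chars.strip cell.toList) := by
        simp [cellCharB, pieceCharA, pyStrIsupperA, pyStrIsupperB, hp]
      have hpc : pieceCharA (PySem.Chars.strip cell.toList) ≠ '.' := pieceCharA_ne_dot _ hne
      simp only [List.foldl_cons]
      rw [show rowStepA (ec, acc) cell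
            = (0, (if ec > 0 then acc ++ PySem.Int.toChars (ec : Int) else acc)
                  ++ [pieceCharA (PySem.Chars.strip cell.toList)]) from by
        simp only [rowStepA, hp]; rfl]
      rw [ih 0 _ hrest]
      simp only [List.map_cons, coll, hchar, if_neg hpc]
      by_cases hec : ec > 0 <;> simp [hec]

theorem rowA_eq_rowB (row : List String)
    (h : ∀ cell ∈ row,
      PySem.Chars.strip cell.toList = ['.'] ∨ (PySem.Chars.strip cell.toList).headD ' ' ≠ '.') :
    rowA row = rowB row := by
  unfold rowA rowB
  rw [rowA_loop row 0 [] h]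
  have hraw : PySem.Chars.join [] (row.map (fun cell => [cellCharB cell])) = row.map cellCharB := by
    rw [show row.map (fun cell => [cellCharB cell]) = (row.map cellCharB).map (fun c => [c]) from by
      simp]
    exact PySem.Chars.join_nil_singletons _
  rw [hraw, join_nil_flatten, rowB_collapse]
  rfl

theorem handA_eq_handB (l : List (String × Int)) : handA l = handB l := by
  unfold handA handB
  rw [join_nil_flatten, ← List.flatMap_def, PySem.List.foldl_append_eq_flatMap]
  rw [List.nil_append]
  congr 1
  funext pc
  by_cases h1 : pc.2 > 1
  · have h0 : pc.2 > 0 := by omega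
    simp [handEntryA, h1, h0]
  · by_cases h0 : pc.2 > 0 <;> simp [handEntryA, h1, h0]

-- ===== VERDICT (by name: the statement is the Claim_ definition above) =====
theorem board_to_sfen_spec : Claim_equal_board_to_sfen := by
  intro board turn hand_pieces move_count _hDom hPre
  unfold Spec_board_to_sfen board_to_sfen board_to_sfen_alt
  rw [PySem.List.foldl_append_singleton_eq_map, List.nil_append]
  have hrows : board.map rowA = board.map rowB := by
    apply List.map_congr_left
    intro row hrow
    exact rowA_eq_rowB row (fun cell hc => (hPre.1 row hrow cell hc).2)
  rw [hrows]
  cases hand_pieces with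
  | none => rfl
  | some l =>
    cases l with
    | nil => rfl
    | cons a t => simp [handA_eq_handB]
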